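-- pv_equiv track=rewrite | github.com/dekelts/cluster2 | Cluster_Deletion-prep.py | all_monotone_sequences
-- ===== SOURCE A (Python) =====
-- def all_monotone_sequences(n, sigma):
-- 	if n == 1:
-- 		return [[c] for c in range(sigma)]
-- 	A = all_monotone_sequences(n-1, sigma)
-- 	B = []
-- 	for x in A:
-- 		if len(x) == n-1:
-- 			B += [[c]+x for c in range(x[0]+1)]
-- 	return A+B
-- ===== SOURCE B (Python) =====
-- def all_monotone_sequences(n, sigma):
--     result = [[c] for c in range(sigma)]
--     cur = result
--     for _ in range(2, n + 1):
--         new = [[c] + x for x in cur for c in range(x[0] + 1)]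
--         result = result + new
--         cur = new
--     return result
-- ===== Notes on version B (the rewrite author's own statement) =====
-- stated objective: alternative
-- what changed: Replaces the recursion on n (which re-scans and length-filters the whole accumulated list at every level) with an iterative layer-by-layer build that keeps only the current-length layer and extends it by a flat comprehension.
import Mathlib
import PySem

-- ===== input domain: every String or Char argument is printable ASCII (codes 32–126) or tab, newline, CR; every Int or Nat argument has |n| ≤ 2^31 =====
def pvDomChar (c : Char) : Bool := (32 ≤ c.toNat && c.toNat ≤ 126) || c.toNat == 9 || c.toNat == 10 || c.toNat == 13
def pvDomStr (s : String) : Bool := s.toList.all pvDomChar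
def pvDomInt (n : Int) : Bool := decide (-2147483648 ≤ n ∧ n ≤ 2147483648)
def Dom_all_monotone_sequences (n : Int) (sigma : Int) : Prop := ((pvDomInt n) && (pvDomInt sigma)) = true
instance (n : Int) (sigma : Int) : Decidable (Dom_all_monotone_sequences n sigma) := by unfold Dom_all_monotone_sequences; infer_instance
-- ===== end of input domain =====

-- B replaces A's recursion (which re-filters the whole accumulator each level) by an
-- iterative build that keeps only the current-length layer (objective: alternative).
-- ===== PORT A =====
-- '[[c] for c in range(sigma)]' (the shared base case of both Pythons)
def amsBase (sigma : Int) : List (List Int) :=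
  (PySem.List.pyRange 0 sigma 1).map (fun c => [c])

-- literal port of A; the 'n < 1' guard only makes the recursion total where the
-- Python recurses forever (RecursionError; excluded by Pre_).  x[0] is ported as
-- x.headD 0: every element of A's list is nonempty, so Python never raises there.
def all_monotone_sequences (n : Int) (sigma : Int) : List (List Int) :=
  if n = 1 then amsBase sigma
  else if n < 1 then []
  else
    let A := all_monotone_sequences (n - 1) sigma
    let B := A.foldl (fun acc x =>
      if (x.length : Int) = n - 1 then
        acc ++ (PySem.List.pyRange 0 (x.headD 0 + 1) 1).map (fun c => c :: x)
      else acc) []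
    A ++ B
termination_by n.toNat
decreasing_by omega

-- ===== PORT B =====
-- '[[c] + x for x in cur for c in range(x[0] + 1)]'
def amsStep (cur : List (List Int)) : List (List Int) :=
  cur.flatMap (fun x => (PySem.List.pyRange 0 (x.headD 0 + 1) 1).map (fun c => c :: x))

def all_monotone_sequences_alt (n : Int) (sigma : Int) : List (List Int) :=
  let base := amsBase sigma
  let p := (PySem.List.pyRange 2 (n + 1) 1).foldl
    (fun (p : List (List Int) × List (List Int)) _ =>
      let new := amsStep p.2
      (p.1 ++ new, new)) (base, base)
  p.1

-- ===== PRECONDITION & SPEC =====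
-- For n < 1 the Python A has no base case and raises RecursionError, so Pre_ requires n ≥ 1.
def Pre_all_monotone_sequences (n : Int) (sigma : Int) : Prop := 1 ≤ n
instance (n : Int) (sigma : Int) : Decidable (Pre_all_monotone_sequences n sigma) := by
  unfold Pre_all_monotone_sequences; infer_instance
def pvWitness_all_monotone_sequences : Int × Int := (3, 3)

def Spec_all_monotone_sequences (n : Int) (sigma : Int) (out : List (List Int)) : Prop :=
  out = all_monotone_sequences_alt n sigma
instance (n : Int) (sigma : Int) (out : List (List Int)) : Decidable (Spec_all_monotone_sequences n sigma out) := by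
  unfold Spec_all_monotone_sequences; infer_instance

-- ===== CLAIM (what is proved, stated in full; the proofs are below) =====
def Claim_equal_all_monotone_sequences : Prop := ∀ (n : Int) (sigma : Int), Dom_all_monotone_sequences n sigma → Pre_all_monotone_sequences n sigma → Spec_all_monotone_sequences n sigma (all_monotone_sequences n sigma)

-- ===== LEMMAS AND PROOFS =====

-- layer k = the sequences of length k+1, in output order
def amsL (sigma : Int) : Nat → List (List Int)
  | 0 => amsBase sigma
  | k + 1 => amsStep (amsL sigma k)

-- concatenation of layers 0..k
def amsR (sigma : Int) : Nat → List (List Int)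
  | 0 => amsBase sigma
  | k + 1 => amsR sigma k ++ amsL sigma (k + 1)

theorem amsL_length {sigma : Int} {k : Nat} {x : List Int} (h : x ∈ amsL sigma k) :
    x.length = k + 1 := by
  induction k generalizing x with
  | zero =>
    simp only [amsL, amsBase, List.mem_map] at h
    obtain ⟨c, _, rfl⟩ := h; rfl
  | succ k ih =>
    simp only [amsL, amsStep, List.mem_flatMap, List.mem_map] at h
    obtain ⟨y, hy, c, _, rfl⟩ := h
    simp [ih hy]

theorem amsR_length {sigma : Int} {k : Nat} {x : List Int} (h : x ∈ amsR sigma k) :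
    x.length ≤ k + 1 := by
  induction k with
  | zero => simpa [amsR] using (amsL_length (sigma := sigma) (k := 0) h).le
  | succ k ih =>
    simp only [amsR, List.mem_append] at h
    rcases h with h | h
    · exact (ih h).trans (by omega)
    · exact (amsL_length h).le

theorem amsR_filter (sigma : Int) (k : Nat) :
    (amsR sigma k).filter (fun x => decide ((x.length : Int) = (k : Int) + 1)) = amsL sigma k := by
  induction k with
  | zero =>
    apply List.filter_eq_self.mpr
    intro x hx
    simp [amsL_length (sigma := sigma) (k := 0) (by simpa [amsR] using hx)]
  | succ k ih =>
    show ((amsR sigma k ++ amsL sigma (k + 1)).filter _) = _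
    rw [List.filter_append]
    have h1 : (amsR sigma k).filter (fun x => decide ((x.length : Int) = ((k + 1 : Nat) : Int) + 1)) = [] := by
      apply List.filter_eq_nil_iff.mpr
      intro x hx
      have := amsR_length hx
      simp only [decide_eq_true_eq]
      push_cast
      omega
    have h2 : (amsL sigma (k + 1)).filter (fun x => decide ((x.length : Int) = ((k + 1 : Nat) : Int) + 1)) = amsL sigma (k + 1) := by
      apply List.filter_eq_self.mpr
      intro x hx
      simp [amsL_length hx]
    rw [h1, h2, List.nil_append]

theorem ams_A_eq (sigma : Int) (k : Nat) :
    all_monotone_sequences ((k : Int) + 1) sigma = amsR sigma k := by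
  induction k with
  | zero => simp [all_monotone_sequences, amsR]
  | succ k ih =>
    rw [all_monotone_sequences]
    have h1 : ¬ ((k + 1 : Nat) : Int) + 1 = 1 := by push_cast; omega
    have h2 : ¬ ((k + 1 : Nat) : Int) + 1 < 1 := by push_cast; omega
    rw [if_neg h1, if_neg h2]
    have hn : ((k + 1 : Nat) : Int) + 1 - 1 = (k : Int) + 1 := by push_cast; ring
    simp only [hn, ih]
    have hfold : (amsR sigma k).foldl (fun acc x =>
        if (x.length : Int) = (k : Int) + 1 then
          acc ++ (PySem.List.pyRange 0 (x.headD 0 + 1) 1).map (fun c => c :: x)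
        else acc) [] = amsL sigma (k + 1) := by
      rw [PySem.List.foldl_ite_eq_foldl_filter]
      have := amsR_filter sigma k
      rw [this]
      rw [PySem.List.foldl_append_eq_flatMap]
      simp [amsL, amsStep]
    rw [hfold]
    rfl

def amsG (p : List (List Int) × List (List Int)) : List (List Int) × List (List Int) :=
  (p.1 ++ amsStep p.2, amsStep p.2)

theorem amsG_iterate (sigma : Int) (k : Nat) :
    amsG^[k] (amsBase sigma, amsBase sigma) = (amsR sigma k, amsL sigma k) := by
  induction k with
  | zero => simp [amsR, amsL]
  | succ k ih =>
    rw [Function.iterate_succ_apply', ih]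
    simp [amsG, amsR, amsL]

theorem foldl_const {α β : Type} (g : α → α) (s : α) (l : List β) :
    l.foldl (fun p _ => g p) s = g^[l.length] s := by
  induction l generalizing s with
  | nil => rfl
  | cons x xs ih => simp [List.foldl_cons, ih, Function.iterate_succ_apply]

theorem ams_alt_eq (sigma : Int) (k : Nat) :
    all_monotone_sequences_alt ((k : Int) + 1) sigma = amsR sigma k := by
  unfold all_monotone_sequences_alt
  have hlen : (PySem.List.pyRange 2 (((k : Int) + 1) + 1) 1).length = k := by
    rw [PySem.List.length_pyRange_one]; omega
  have h : (PySem.List.pyRange 2 (((k : Int) + 1) + 1) 1).foldl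
      (fun (p : List (List Int) × List (List Int)) _ =>
        (p.1 ++ amsStep p.2, amsStep p.2)) (amsBase sigma, amsBase sigma)
      = (amsR sigma k, amsL sigma k) := by
    have := foldl_const (α := List (List Int) × List (List Int)) amsG
      (amsBase sigma, amsBase sigma) (PySem.List.pyRange 2 (((k : Int) + 1) + 1) 1)
    simp only [amsG] at this
    rw [this, hlen, amsG_iterate]
  simp only [h]

-- ===== VERDICT (by name: the statement is the Claim_ definition above) =====
theorem all_monotone_sequences_spec : Claim_equal_all_monotone_sequences := by
  intro n sigma _ hpre
  have hk : n = (((n - 1).toNat : Nat) : Int) + 1 := by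
    unfold Pre_all_monotone_sequences at hpre; omega
  show all_monotone_sequences n sigma = all_monotone_sequences_alt n sigma
  rw [hk, ams_A_eq, ams_alt_eq]
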